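-- pv_equiv track=rewrite | github.com/OliverIgnetik/Data-Structures-Algorithms-Python | strings/replace_words_with_prefix.py | prefix_match
-- ===== SOURCE A (Python) =====
-- from typing import List
--
-- def prefix_match(word: str, prefixes: List[str]) -> str:
--     shortest_prefix = float('inf')
--     index = 0
--     found = False
--     for i, prefix in enumerate(prefixes):
--         if len(prefix) < shortest_prefix and word.startswith(prefix):
--             shortest_prefix = len(prefix)
--             index = i
--             found = True
--     if found:
--         return prefixes[index]
--     else:
--         return None
-- ===== SOURCE B (Python) =====
-- def prefix_match(word, prefixes):
--     for p in sorted(prefixes, key=len):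
--         if word.startswith(p):
--             return p
--     return None
-- ===== Notes on version B (the rewrite author's own statement) =====
-- stated objective: simpler
-- what changed: Replaces A's running-minimum scan with index/found bookkeeping by a stable length-sort followed by returning the first prefix the word starts with.
import Mathlib
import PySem

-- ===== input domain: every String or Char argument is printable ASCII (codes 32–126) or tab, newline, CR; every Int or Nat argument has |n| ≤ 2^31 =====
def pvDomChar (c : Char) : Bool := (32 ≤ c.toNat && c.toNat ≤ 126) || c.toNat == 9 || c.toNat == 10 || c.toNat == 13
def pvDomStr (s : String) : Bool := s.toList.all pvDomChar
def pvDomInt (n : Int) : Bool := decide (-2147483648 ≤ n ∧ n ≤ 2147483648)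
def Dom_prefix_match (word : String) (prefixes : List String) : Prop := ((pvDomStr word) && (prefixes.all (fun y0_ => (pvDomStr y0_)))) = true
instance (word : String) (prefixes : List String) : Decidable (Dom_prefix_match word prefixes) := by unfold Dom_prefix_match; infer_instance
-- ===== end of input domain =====

-- B replaces A's running-minimum/index/found scan by a stable length-sort followed by a
-- first-match scan (simpler; same return value everywhere, A is total).

-- ===== PORT A =====
-- float('inf') is modelled by `none` in the running minimum: its only use is the `<` test,
-- and `len(prefix) < float('inf')` is always true.
def prefix_match (word : String) (prefixes : List String) : Option String :=
  let st := (PySem.List.enumerate prefixes).foldl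
    (fun (st : Option Int × Int × Bool) ip =>
      if ((match st.1 with
           | none => true
           | some m => decide (PySem.Str.len ip.2 < m)) && PySem.Str.startswith word ip.2) = true
      then (some (PySem.Str.len ip.2), ip.1, true)
      else st)
    (none, 0, false)
  if st.2.2 then PySem.List.pyGet? prefixes st.2.1 else none

-- ===== PORT B =====
def prefix_match_alt (word : String) (prefixes : List String) : Option String :=
  (PySem.List.sorted prefixes (fun p => PySem.Str.len p)).find?
    (fun p => PySem.Str.startswith word p)

-- ===== PRECONDITION & SPEC =====
def Spec_prefix_match (word : String) (prefixes : List String) (out : Option String) : Prop := out = prefix_match_alt word prefixes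
instance (word : String) (prefixes : List String) (out : Option String) : Decidable (Spec_prefix_match word prefixes out) := by unfold Spec_prefix_match; infer_instance

-- ===== CLAIM (what is proved, stated in full; the proofs are below) =====
def Claim_equal_prefix_match : Prop := ∀ (word : String) (prefixes : List String), Dom_prefix_match word prefixes → Spec_prefix_match word prefixes (prefix_match word prefixes)

-- ===== LEMMAS AND PROOFS =====

-- A's value-level step: keep the current best unless the new prefix matches and is strictly shorter.
def pvStepV (word : String) (best : Option String) (p : String) : Option String :=
  if ((match best with
       | none => true
       | some b => decide (PySem.Str.len p < PySem.Str.len b)) && PySem.Str.startswith word p) = true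
  then some p else best

-- find? after a stable insertion into a key-sorted list is exactly the running-minimum step.
theorem find?_insertBy_sorted (q : String → Bool) (key : String → Int) (x : String)
    (acc : List String) (h : acc.Pairwise (fun a b => key a ≤ key b)) :
    (PySem.List.insertBy (fun a b => decide (key a < key b)) x acc).find? q =
      match acc.find? q with
      | none => if q x then some x else none
      | some b => if (q x && decide (key x < key b)) = true then some x else some b := by
  induction acc with
  | nil => simp [PySem.List.insertBy]
  | cons y ys ih =>
    have hpw : ys.Pairwise (fun a b => key a ≤ key b) := h.tail
    have hle : ∀ b ∈ ys, key y ≤ key b := (List.pairwise_cons.mp h).1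
    simp only [PySem.List.insertBy]
    by_cases hxy : key x < key y
    · simp only [hxy, decide_true, if_true]
      cases hqx : q x with
      | true =>
        rw [List.find?_cons_of_pos hqx]
        cases hfy : List.find? q (y :: ys) with
        | none => simp
        | some b =>
          have hb : b ∈ y :: ys := List.mem_of_find?_eq_some hfy
          have hlt : key x < key b := by
            rcases List.mem_cons.mp hb with rfl | hb'
            · exact hxy
            · exact lt_of_lt_of_le hxy (hle b hb')
          simp [hlt]
      | false =>
        rw [List.find?_cons_of_neg (by simp [hqx])]
        cases hfy : List.find? q (y :: ys) with
        | none => simp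
        | some b => simp
    · simp only [hxy, decide_false, Bool.false_eq_true, if_false]
      cases hqy : q y with
      | true =>
        rw [List.find?_cons_of_pos hqy, List.find?_cons_of_pos hqy]
        simp [hxy]
      | false =>
        rw [List.find?_cons_of_neg (by simp [hqy]), List.find?_cons_of_neg (by simp [hqy])]
        exact ih hpw

-- running the value-level fold equals find? over the stable sort
theorem foldV_eq_find?_sorted (word : String) (xs : List String) :
    xs.foldl (pvStepV word) none =
      (PySem.List.sorted xs (fun p => PySem.Str.len p)).find?
        (fun p => PySem.Str.startswith word p) := by
  induction xs using List.reverseRecOn with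
  | nil => simp [PySem.List.sorted_eq_foldl_insertBy]
  | append_singleton xs x ih =>
    rw [List.foldl_append, List.foldl_cons, List.foldl_nil, ih]
    have hins : PySem.List.sorted (xs ++ [x]) (fun p => PySem.Str.len p) =
        PySem.List.insertBy (fun a b => decide (PySem.Str.len a < PySem.Str.len b)) x
          (PySem.List.sorted xs (fun p => PySem.Str.len p)) := by
      rw [PySem.List.sorted_eq_foldl_insertBy, PySem.List.sorted_eq_foldl_insertBy,
          List.foldl_append, List.foldl_cons, List.foldl_nil]
    rw [hins,
        find?_insertBy_sorted (fun p => PySem.Str.startswith word p)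
          (fun p => PySem.Str.len p) x _
          (PySem.List.sorted_pairwise xs (fun p => PySem.Str.len p))]
    cases hf : (PySem.List.sorted xs (fun p => PySem.Str.len p)).find?
        (fun p => PySem.Str.startswith word p) with
    | none =>
      simp [pvStepV]
    | some b =>
      simp only [pvStepV]
      split_ifs with h1 h2 <;> first | rfl | simp_all [Bool.and_comm]

-- the invariant tying A's (shortest, index, found) state to the value-level best
def pvRel (L : List String) (st : Option Int × Int × Bool) (best : Option String) : Prop :=
  (st.2.2 = false ∧ best = none ∧ st.1 = none) ∨
  (st.2.2 = true ∧ ∃ b, PySem.List.pyGet? L st.2.1 = some b ∧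
      st.1 = some (PySem.Str.len b) ∧ best = some b)

def pvStepA (word : String) (st : Option Int × Int × Bool) (ip : Int × String) :
    Option Int × Int × Bool :=
  if ((match st.1 with
       | none => true
       | some m => decide (PySem.Str.len ip.2 < m)) && PySem.Str.startswith word ip.2) = true
  then (some (PySem.Str.len ip.2), ip.1, true)
  else st

theorem foldA_rel (word : String) (L : List String) :
    ∀ (xs : List String) (s : Int) (st : Option Int × Int × Bool) (best : Option String),
      pvRel L st best →
      (∀ pr ∈ PySem.List.enumerate xs s, PySem.List.pyGet? L pr.1 = some pr.2) →
      pvRel L ((PySem.List.enumerate xs s).foldl (pvStepA word) st)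
        (xs.foldl (pvStepV word) best) := by
  intro xs
  induction xs with
  | nil => intro s st best hrel _; simpa [PySem.List.enumerate] using hrel
  | cons p t ih =>
    intro s st best hrel hall
    rw [PySem.List.enumerate_cons, List.foldl_cons, List.foldl_cons]
    have hhd : PySem.List.pyGet? L s = some p := by
      have := hall (s, p) (by rw [PySem.List.enumerate_cons]; exact List.mem_cons_self)
      simpa using this
    have htl : ∀ pr ∈ PySem.List.enumerate t (s + 1), PySem.List.pyGet? L pr.1 = some pr.2 := by
      intro pr hpr
      exact hall pr (by rw [PySem.List.enumerate_cons]; exact List.mem_cons_of_mem _ hpr)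
    apply ih (s + 1) _ _ _ htl
    -- the two step conditions agree under the invariant
    rcases hrel with ⟨hf, hb, hs⟩ | ⟨hf, b, hget, hs, hb⟩
    · subst hb
      simp only [pvStepA, pvStepV, hs]
      cases hq : PySem.Str.startswith word p with
      | true =>
        simp only [Bool.and_self, if_true]
        exact Or.inr ⟨rfl, p, hhd, rfl, rfl⟩
      | false =>
        simp only [Bool.and_false, Bool.false_eq_true, if_false]
        exact Or.inl ⟨hf, rfl, hs⟩
    · subst hb
      simp only [pvStepA, pvStepV, hs]
      cases hc : (decide (PySem.Str.len p < PySem.Str.len b) && PySem.Str.startswith word p) with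
      | true =>
        simp only [if_true]
        exact Or.inr ⟨rfl, p, hhd, rfl, rfl⟩
      | false =>
        simp only [Bool.false_eq_true, if_false]
        exact Or.inr ⟨hf, b, hget, hs, rfl⟩

theorem enumerate_pyGet? (L : List String) :
    ∀ pr ∈ PySem.List.enumerate L 0, PySem.List.pyGet? L pr.1 = some pr.2 := by
  intro pr hpr
  rcases (PySem.List.mem_enumerate_iff L 0 pr).mp hpr with ⟨k, hk, rfl⟩
  simp [hk]

-- ===== VERDICT (by name: the statement is the Claim_ definition above) =====
theorem prefix_match_spec : Claim_equal_prefix_match := by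
  intro word prefixes _
  unfold Spec_prefix_match prefix_match prefix_match_alt
  rw [← foldV_eq_find?_sorted]
  have hrel := foldA_rel word prefixes prefixes 0 (none, 0, false) none
    (Or.inl ⟨rfl, rfl, rfl⟩) (enumerate_pyGet? prefixes)
  -- the step functions in the two ports are definitionally pvStepA / pvStepV
  show (if ((PySem.List.enumerate prefixes 0).foldl (pvStepA word) (none, 0, false)).2.2 = true
        then PySem.List.pyGet? prefixes
          ((PySem.List.enumerate prefixes 0).foldl (pvStepA word) (none, 0, false)).2.1
        else none)
      = prefixes.foldl (pvStepV word) none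
  rcases hrel with ⟨hf, hb, _⟩ | ⟨hf, b, hget, _, hb⟩
  · rw [hf, hb]
    simp
  · rw [hf, hb, if_pos rfl, hget]
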